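-- pv_equiv track=rewrite | github.com/saikartheekb/AdventOfCode | AOC2024/Day5/main.py | parse_rules_updates
-- ===== SOURCE A (Python) =====
-- def parse_rules_updates(input_data):
--     rules = []
--     updates = []
--     flip = True
--     for line in input_data:
--         if line.strip() == "":
--             flip = False
--             continue
--         if flip:
--             rules.append(line.strip().split("|"))
--         else:
--             updates.append(line.strip())
--     return rules, updates
-- ===== SOURCE B (Python) =====
-- def parse_rules_updates(input_data):
--     lines = list(input_data)
--     split = next((i for i, l in enumerate(lines) if l.strip() == ""), len(lines))
--     rules = [l.strip().split("|") for l in lines[:split]]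
--     updates = [l.strip() for l in lines[split + 1:] if l.strip() != ""]
--     return rules, updates
-- ===== Notes on version B (the rewrite author's own statement) =====
-- stated objective: alternative
-- what changed: Replaced the single stateful flip-flag loop with a find-the-split-index step followed by two separate shaped passes (a map over the prefix for rules, a filter+map over the suffix for updates).
import Mathlib
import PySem

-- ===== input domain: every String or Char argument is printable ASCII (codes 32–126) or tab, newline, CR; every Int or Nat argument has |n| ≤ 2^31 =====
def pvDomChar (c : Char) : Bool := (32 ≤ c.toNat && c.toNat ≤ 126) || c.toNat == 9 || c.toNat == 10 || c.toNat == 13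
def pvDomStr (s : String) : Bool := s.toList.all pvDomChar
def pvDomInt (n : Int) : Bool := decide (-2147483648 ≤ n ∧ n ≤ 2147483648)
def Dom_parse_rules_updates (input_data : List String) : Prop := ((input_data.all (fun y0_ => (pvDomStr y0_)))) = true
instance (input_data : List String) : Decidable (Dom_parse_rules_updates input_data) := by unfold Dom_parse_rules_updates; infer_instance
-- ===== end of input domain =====

-- B replaces A's stateful flip-flag loop by locating the first blank line and making two separate passes (prefix → rules, suffix → updates); same return value, alternative decomposition.

-- s.split("|") : sep is the nonempty literal "|", so split? always returns some
def pySplitBar (s : String) : List String :=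
  match PySem.Str.split? s "|" with
  | some r => r
  | none => []

-- ===== PORT A =====
-- the for-loop of A, carried state (rules, updates, flip), branches in A's order
def parseRulesUpdatesLoop (lines : List String) (rules : List (List String))
    (updates : List String) (flip : Bool) : List (List String) × List String :=
  match lines with
  | [] => (rules, updates)
  | line :: rest =>
    if PySem.Str.strip line == "" then
      parseRulesUpdatesLoop rest rules updates false
    else if flip then
      parseRulesUpdatesLoop rest (rules ++ [pySplitBar (PySem.Str.strip line)]) updates flip
    else
      parseRulesUpdatesLoop rest rules (updates ++ [PySem.Str.strip line]) flip

def parse_rules_updates (input_data : List String) : List (List String) × List String :=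
  parseRulesUpdatesLoop input_data [] [] true

-- ===== PORT B =====
def parse_rules_updates_alt (input_data : List String) : List (List String) × List String :=
  let lines := input_data
  let split := match lines.findIdx? (fun l => PySem.Str.strip l == "") with
               | some i => i
               | none => lines.length
  let rules := (lines.take split).map (fun l => pySplitBar (PySem.Str.strip l))
  let updates := ((lines.drop (split + 1)).filter (fun l => PySem.Str.strip l != "")).map PySem.Str.strip
  (rules, updates)

-- ===== PRECONDITION & SPEC =====
def Spec_parse_rules_updates (input_data : List String) (out : List (List String) × List String) : Prop := out = parse_rules_updates_alt input_data
instance (input_data : List String) (out : List (List String) × List String) : Decidable (Spec_parse_rules_updates input_data out) := by unfold Spec_parse_rules_updates; infer_instance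

-- ===== CLAIM (what is proved, stated in full; the proofs are below) =====
def Claim_equal_parse_rules_updates : Prop := ∀ (input_data : List String), Dom_parse_rules_updates input_data → Spec_parse_rules_updates input_data (parse_rules_updates input_data)

-- ===== LEMMAS AND PROOFS =====

-- after the flip: the loop only collects stripped non-blank lines into updates
theorem loop_false (lines : List String) : ∀ (rules : List (List String)) (updates : List String),
    parseRulesUpdatesLoop lines rules updates false =
      (rules, updates ++ (lines.filter (fun l => PySem.Str.strip l != "")).map PySem.Str.strip) := by
  induction lines with
  | nil => simp [parseRulesUpdatesLoop]
  | cons line rest ih =>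
    intro rules updates
    by_cases h : PySem.Str.strip line = ""
    · simp [parseRulesUpdatesLoop, h, ih]
    · simp [parseRulesUpdatesLoop, h, ih]

-- before the flip: the loop's result is B's split-based decomposition, appended to the accumulators
theorem loop_true (lines : List String) : ∀ (rules : List (List String)) (updates : List String),
    parseRulesUpdatesLoop lines rules updates true =
      (rules ++ (parse_rules_updates_alt lines).1, updates ++ (parse_rules_updates_alt lines).2) := by
  induction lines with
  | nil => simp [parseRulesUpdatesLoop, parse_rules_updates_alt]
  | cons line rest ih =>
    intro rules updates
    by_cases h : PySem.Str.strip line = ""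
    · simp [parseRulesUpdatesLoop, h, loop_false, parse_rules_updates_alt,
        List.findIdx?_cons]
    · simp [parseRulesUpdatesLoop, h, ih, parse_rules_updates_alt, List.findIdx?_cons]
      cases hf : rest.findIdx? (fun l => PySem.Str.strip l == "") with
      | none => simp
      | some i => simp

-- ===== VERDICT (by name: the statement is the Claim_ definition above) =====
theorem parse_rules_updates_spec : Claim_equal_parse_rules_updates := by
  intro input_data _
  unfold Spec_parse_rules_updates parse_rules_updates
  rw [loop_true]
  simp
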